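-- pv_equiv track=rewrite | github.com/francool57/FProg-Resolucoes | LAB05/ex10.py | misterio
-- ===== SOURCE A (Python) =====
-- def inverter_num(n):
--     inv = 0
--     while n > 0:
--         last_digit = n % 10
--         inv = inv * 10 + last_digit
--         n //= 10
--
--     return inv
--
-- def misterio(n):
--     a = n          # Definir a como n para o n continuar como numero inicial
--     l = 0          # Contar a lenght do numero
--     while a > 0:   # A funcao len(n) nao e possivel com int
--         l += 1
--         a //= 10
--
--     if l != 3 or abs(n//100 - n%10) < 1:
--         raise ValueError('Condições não verificadas')
--
--     n_inv = inverter_num(n)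
--     ns = abs(n - n_inv)
--     ns_inv = inverter_num(ns)
--
--     return ns + ns_inv
-- ===== SOURCE B (Python) =====
-- def misterio(n):
--     if not (n > 0 and len(str(n)) == 3) or abs(n // 100 - n % 10) < 1:
--         raise ValueError('Condições não verificadas')
--     ns = abs(n - int(str(n)[::-1]))
--     return ns + int(str(ns)[::-1])
-- ===== Notes on version B (the rewrite author's own statement) =====
-- stated objective: idiomatic
-- what changed: Replaces A's three arithmetic while-loops (digit counting and two hand-rolled digit reversals) with string operations: a length-of-str digit count guarded by positivity, and reversed-string-to-int for both reversals.
import Mathlib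
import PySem

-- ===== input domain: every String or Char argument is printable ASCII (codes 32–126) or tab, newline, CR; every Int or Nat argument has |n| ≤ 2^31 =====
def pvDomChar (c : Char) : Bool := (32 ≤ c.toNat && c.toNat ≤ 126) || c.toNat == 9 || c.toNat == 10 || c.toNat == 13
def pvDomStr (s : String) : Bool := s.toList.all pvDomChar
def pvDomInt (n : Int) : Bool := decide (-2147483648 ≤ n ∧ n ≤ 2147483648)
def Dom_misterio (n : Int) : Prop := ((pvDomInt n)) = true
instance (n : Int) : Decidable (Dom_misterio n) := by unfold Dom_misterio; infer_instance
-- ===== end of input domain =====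

-- B replaces A's three digit-manipulation while-loops by string conversion and slicing
-- (len(str(n)), int(str(x)[::-1])); same return value wherever A returns (Pre_ below).

-- ===== PORT A =====
-- while n > 0: inv = inv*10 + n%10; n //= 10   (fuel = n.toNat bounds the iteration count; the guard 'n > 0' is the loop test)
def pvInvAux : Nat → Int → Int → Int
  | 0, _, inv => inv
  | fuel + 1, n, inv =>
    if n > 0 then pvInvAux fuel (PySem.Int.floordiv n 10) (inv * 10 + PySem.Int.mod n 10) else inv

def inverterNum (n : Int) : Int := pvInvAux n.toNat n 0

-- while a > 0: l += 1; a //= 10   (same fuel scheme)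
def pvLenAux : Nat → Int → Int → Int
  | 0, _, l => l
  | fuel + 1, a, l =>
    if a > 0 then pvLenAux fuel (PySem.Int.floordiv a 10) (l + 1) else l

def misterio (n : Int) : Int :=
  let l := pvLenAux n.toNat n 0
  if l ≠ 3 ∨ |PySem.Int.floordiv n 100 - PySem.Int.mod n 10| < 1 then 0  -- raise ValueError (excluded by Pre_)
  else
    let n_inv := inverterNum n
    let ns := |n - n_inv|
    let ns_inv := inverterNum ns
    ns + ns_inv

-- ===== PORT B =====
-- int(str(x)[::-1])
def pvRevInt (x : Int) : Int :=
  (PySem.Int.ofChars? ((PySem.List.slice? (PySem.Int.toChars x) none none (-1)).getD [])).getD 0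

def misterio_alt (n : Int) : Int :=
  if ¬(n > 0 ∧ (PySem.Int.toChars n).length = 3) ∨ |PySem.Int.floordiv n 100 - PySem.Int.mod n 10| < 1 then 0  -- raise ValueError (excluded by Pre_)
  else
    let ns := |n - pvRevInt n|
    ns + pvRevInt ns

-- ===== PRECONDITION & SPEC =====
-- Pre_ excludes exactly the inputs on which A raises ValueError: n not a positive three-digit
-- number, or its first and last digits too close (differing by zero).
def Pre_misterio (n : Int) : Prop :=
  100 ≤ n ∧ n ≤ 999 ∧ 1 ≤ |PySem.Int.floordiv n 100 - PySem.Int.mod n 10|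
instance (n : Int) : Decidable (Pre_misterio n) := by unfold Pre_misterio; infer_instance

def pvWitness_misterio : Int := 352

def Spec_misterio (n : Int) (out : Int) : Prop := out = misterio_alt n
instance (n : Int) (out : Int) : Decidable (Spec_misterio n out) := by unfold Spec_misterio; infer_instance

-- ===== CLAIM (what is proved, stated in full; the proofs are below) =====
def Claim_equal_misterio : Prop := ∀ (n : Int), Dom_misterio n → Pre_misterio n → Spec_misterio n (misterio n)

-- ===== LEMMAS AND PROOFS =====
-- finite check: the two ports agree on every 3-digit input (Pre_ or not; both return 0 on the raise branch)
set_option maxHeartbeats 4000000 in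
set_option maxRecDepth 100000 in
theorem pvAgree900 : ∀ k : Fin 900, misterio (100 + (k : Int)) = misterio_alt (100 + (k : Int)) := by
  decide

-- ===== VERDICT (by name: the statement is the Claim_ definition above) =====
theorem misterio_spec : Claim_equal_misterio := by
  intro n _ hPre
  obtain ⟨h1, h2, _⟩ := hPre
  unfold Spec_misterio
  have hk : (n - 100).toNat < 900 := by omega
  have := pvAgree900 ⟨(n - 100).toNat, hk⟩
  have heq : (100 : Int) + ((n - 100).toNat : Int) = n := by omega
  rw [heq] at this
  exact this
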